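-- pv_equiv track=rewrite | github.com/CristoBits0101/rag-agentic-ai-toolkit | spikes/17-voice_assistant/ui/voice_desktop_ui.py | build_status_message
-- ===== SOURCE A (Python) =====
-- def build_status_message(message: str) -> str:
--     compact_message = " ".join((message or "").split())
--     if not compact_message:
--         return "Sin informacion."
--
--     sentence_indexes = [
--         compact_message.find(separator)
--         for separator in (". ", "! ", "? ")
--         if compact_message.find(separator) != -1
--     ]
--     if not sentence_indexes:
--         return compact_message
--
--     first_sentence_end = min(sentence_indexes)
--     return compact_message[: first_sentence_end + 1]
-- ===== SOURCE B (Python) =====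
-- def build_status_message(message: str) -> str:
--     compact_message = " ".join((message or "").split())
--     if not compact_message:
--         return "Sin informacion."
--     for i in range(len(compact_message) - 1):
--         if compact_message[i] in ".!?" and compact_message[i + 1] == " ":
--             return compact_message[: i + 1]
--     return compact_message
-- ===== Notes on version B (the rewrite author's own statement) =====
-- stated objective: simpler
-- what changed: Replaces the three separate substring find calls, the index-list comprehension and the min() over it by a single left-to-right scan that cuts at the first sentence-ending punctuation mark that is immediately followed by a space.
import Mathlib
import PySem

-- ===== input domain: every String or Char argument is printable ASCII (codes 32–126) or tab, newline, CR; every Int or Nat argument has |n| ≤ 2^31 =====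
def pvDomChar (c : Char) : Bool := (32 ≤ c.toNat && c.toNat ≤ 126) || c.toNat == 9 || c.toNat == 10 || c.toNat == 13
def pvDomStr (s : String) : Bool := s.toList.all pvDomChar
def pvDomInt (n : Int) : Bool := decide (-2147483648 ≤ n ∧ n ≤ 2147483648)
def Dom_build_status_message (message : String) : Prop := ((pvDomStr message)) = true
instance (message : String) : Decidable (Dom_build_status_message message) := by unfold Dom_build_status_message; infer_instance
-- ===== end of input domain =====

-- B replaces A's three find calls + comprehension + min() by one left-to-right pair scan; objective: simpler.

-- ===== PORT A =====
-- the three two-char separators of A, as char lists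
def sepsA : List (List Char) := [['.', ' '], ['!', ' '], ['?', ' ']]

-- body of A after the compaction: the comprehension of finds, the emptiness test, min, slice
def coreA (l : List Char) : List Char :=
  let sentence_indexes :=
    (sepsA.map (fun sep => PySem.Chars.find l sep)).filter (fun n => n ≠ -1)
  if sentence_indexes = [] then l
  else
    match PySem.List.min? sentence_indexes id with
    | some first_sentence_end => PySem.List.slice l none (some (first_sentence_end + 1))
    | none => l   -- unreachable: the list was tested nonempty

def build_status_message (message : String) : String :=
  let compact_message := PySem.Str.join " " (PySem.Str.split₀ message)
  if compact_message = "" then "Sin informacion."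
  else String.ofList (coreA compact_message.toList)

-- ===== PORT B =====
-- the for-loop over adjacent pairs: the first sentence-ending mark followed by a space cuts the string there
def scanB : List Char → List Char
  | [] => []
  | [c] => [c]
  | c1 :: c2 :: rest =>
      if (c1 = '.' ∨ c1 = '!' ∨ c1 = '?') ∧ c2 = ' ' then [c1]
      else c1 :: scanB (c2 :: rest)

def build_status_message_alt (message : String) : String :=
  let compact_message := PySem.Str.join " " (PySem.Str.split₀ message)
  if compact_message = "" then "Sin informacion."
  else String.ofList (scanB compact_message.toList)

-- ===== PRECONDITION & SPEC =====
def Spec_build_status_message (message : String) (out : String) : Prop := out = build_status_message_alt message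
instance (message : String) (out : String) : Decidable (Spec_build_status_message message out) := by unfold Spec_build_status_message; infer_instance

-- ===== CLAIM (what is proved, stated in full; the proofs are below) =====
def Claim_equal_build_status_message : Prop := ∀ (message : String), Dom_build_status_message message → Spec_build_status_message message (build_status_message message)

-- ===== LEMMAS AND PROOFS =====

-- "position i is a sentence end": one of the three punctuation chars immediately followed by ' '
def hitB (l : List Char) (i : Nat) : Bool :=
  (l[i]? = some '.' || l[i]? = some '!' || l[i]? = some '?') && l[i + 1]? = some ' '

theorem prefix_pair_iff (c : Char) (l : List Char) (i : Nat) :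
    [c, ' '] <+: l.drop i ↔ (l[i]? = some c ∧ l[i + 1]? = some ' ') := by
  rw [List.cons_prefix_iff]
  constructor
  · rintro ⟨t, ht, hp⟩
    rw [List.cons_prefix_iff] at hp
    rcases hp with ⟨t', ht', -⟩
    have h0 : (l.drop i)[0]? = some c := by rw [ht]; simp
    have h1 : (l.drop i)[1]? = some ' ' := by rw [ht, ht']; simp
    rw [List.getElem?_drop] at h0 h1
    simpa using ⟨h0, h1⟩
  · rintro ⟨h0, h1⟩
    have h0' : (l.drop i)[0]? = some c := by rw [List.getElem?_drop]; simpa using h0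
    have h1' : (l.drop i)[1]? = some ' ' := by rw [List.getElem?_drop]; simpa using h1
    match hd : l.drop i with
    | [] => simp [hd] at h0'
    | [a] => simp [hd] at h1'
    | a :: b :: t =>
        rw [hd] at h0' h1'; simp at h0' h1'
        exact ⟨b :: t, by rw [h0'], by rw [h1', List.cons_prefix_iff]; exact ⟨t, rfl, List.nil_prefix⟩⟩

theorem hitB_succ (a : Char) (l : List Char) (i : Nat) :
    hitB (a :: l) (i + 1) = hitB l i := rfl

theorem hitB_of (l : List Char) (j : Nat) (c : Char) (h0 : l[j]? = some c)
    (h1 : l[j + 1]? = some ' ') (hc : c = '.' ∨ c = '!' ∨ c = '?') : hitB l j = true := by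
  unfold hitB
  rcases hc with rfl | rfl | rfl <;> simp [h0, h1]

theorem scanB_of_no_hit (l : List Char) (h : ∀ i, hitB l i = false) : scanB l = l := by
  match l with
  | [] => rfl
  | [c] => rfl
  | c1 :: c2 :: rest =>
      have h0 := h 0
      simp [hitB] at h0
      rw [scanB]
      have hih := scanB_of_no_hit (c2 :: rest) (fun i => by rw [← hitB_succ c1]; exact h (i + 1))
      rw [if_neg (by tauto), hih]

theorem scanB_of_first_hit (l : List Char) (i : Nat) (hi : hitB l i = true)
    (hmin : ∀ j, j < i → hitB l j = false) : scanB l = l.take (i + 1) := by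
  match l, i with
  | [], i => simp [hitB] at hi
  | [c], i => simp [hitB] at hi
  | c1 :: c2 :: rest, 0 =>
      simp [hitB] at hi
      rw [scanB, if_pos (by tauto)]
      simp [hi.2]
  | c1 :: c2 :: rest, (i + 1) =>
      have h0 := hmin 0 (Nat.succ_pos _)
      simp [hitB] at h0
      rw [scanB, if_neg (by tauto)]
      rw [hitB_succ] at hi
      have hih := scanB_of_first_hit (c2 :: rest) i hi
        (fun j hj => by rw [← hitB_succ c1]; exact hmin (j + 1) (by omega))
      rw [hih]; rfl

-- find l [c,' '] for the char of the first overall hit equals that hit's index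
theorem find_eq_of_first_hit (l : List Char) (i : Nat) (c : Char)
    (hc : l[i]? = some c) (hsp : l[i + 1]? = some ' ')
    (hCmem : c = '.' ∨ c = '!' ∨ c = '?')
    (hmin : ∀ j, j < i → hitB l j = false) :
    PySem.Chars.find l [c, ' '] = (i : Int) := by
  have hinf : [c, ' '] <:+: l := by
    rw [← (PySem.Chars.isIn_iff_infix _ _), ← PySem.Chars.exists_prefix_drop_iff_isIn]
    exact ⟨i, (prefix_pair_iff c l i).2 ⟨hc, hsp⟩⟩
  have hpos : 0 ≤ PySem.Chars.find l [c, ' '] := (PySem.Chars.find_nonneg_iff _ _).2 hinf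
  obtain ⟨hpref, hleast⟩ := PySem.Chars.find_spec hpos
  set k := (PySem.Chars.find l [c, ' ']).toNat with hk
  have hki : k ≤ i := by
    by_contra hgt
    exact hleast i (by omega) ((prefix_pair_iff c l i).2 ⟨hc, hsp⟩)
  have hik : ¬ k < i := by
    intro hlt
    have hpair := (prefix_pair_iff c l k).1 hpref
    exact absurd (hitB_of l k c hpair.1 hpair.2 hCmem) (by simp [hmin k hlt])
  have : k = i := by omega
  omega

-- any index appearing among the (non -1) finds is a hit position, hence ≥ the first hit
theorem find_mem_ge (l : List Char) (i : Nat)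
    (hmin : ∀ j, j < i → hitB l j = false)
    (c : Char) (hCmem : c = '.' ∨ c = '!' ∨ c = '?')
    (hne : PySem.Chars.find l [c, ' '] ≠ -1) :
    (i : Int) ≤ PySem.Chars.find l [c, ' '] := by
  have hinf : [c, ' '] <:+: l := by
    by_contra h
    exact hne ((PySem.Chars.find_eq_neg_one_iff _ _).2 h)
  have hpos : 0 ≤ PySem.Chars.find l [c, ' '] := (PySem.Chars.find_nonneg_iff _ _).2 hinf
  obtain ⟨hpref, -⟩ := PySem.Chars.find_spec hpos
  set k := (PySem.Chars.find l [c, ' ']).toNat with hk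
  have hpair := (prefix_pair_iff c l k).1 hpref
  by_contra hlt
  have hki : k < i := by omega
  exact absurd (hitB_of l k c hpair.1 hpair.2 hCmem) (by simp [hmin k hki])

theorem coreA_eq_scanB (l : List Char) : coreA l = scanB l := by
  by_cases hex : ∃ i, hitB l i = true
  · -- i := first hit
    have hi : hitB l (Nat.find hex) = true := Nat.find_spec hex
    have hmin : ∀ j, j < Nat.find hex → hitB l j = false := by
      intro j hj
      have := Nat.find_min hex hj
      simpa using this
    set i := Nat.find hex with hidef
    simp only [hitB, Bool.and_eq_true, Bool.or_eq_true, decide_eq_true_eq] at hi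
    obtain ⟨hc3, hsp⟩ := hi
    obtain ⟨c, hc, hCmem⟩ : ∃ c, l[i]? = some c ∧ (c = '.' ∨ c = '!' ∨ c = '?') := by
      rcases hc3 with (h | h) | h
      exacts [⟨'.', h, Or.inl rfl⟩, ⟨'!', h, Or.inr (Or.inl rfl)⟩, ⟨'?', h, Or.inr (Or.inr rfl)⟩]
    have hfc : PySem.Chars.find l [c, ' '] = (i : Int) :=
      find_eq_of_first_hit l i c hc hsp hCmem hmin
    -- the filtered index list and its min
    unfold coreA
    set idxs := (sepsA.map (fun sep => PySem.Chars.find l sep)).filter (fun n => n ≠ -1) with hidxs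
    have hmem : (i : Int) ∈ idxs := by
      rw [hidxs, List.mem_filter]
      constructor
      · rw [List.mem_map]
        refine ⟨[c, ' '], ?_, hfc⟩
        rcases hCmem with h | h | h <;> simp [sepsA, h]
      · simp only [decide_eq_true_eq]; omega
    have hge : ∀ x ∈ idxs, (i : Int) ≤ x := by
      intro x hx
      rw [hidxs, List.mem_filter, List.mem_map] at hx
      obtain ⟨⟨sep, hsep, hfind⟩, hne⟩ := hx
      subst hfind
      simp at hne
      have : ∃ d, sep = [d, ' '] ∧ (d = '.' ∨ d = '!' ∨ d = '?') := by
        simp [sepsA] at hsep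
        rcases hsep with h | h | h <;> subst h
        exacts [⟨'.', rfl, Or.inl rfl⟩, ⟨'!', rfl, Or.inr (Or.inl rfl)⟩, ⟨'?', rfl, Or.inr (Or.inr rfl)⟩]
      obtain ⟨d, rfl, hd⟩ := this
      exact find_mem_ge l i hmin d hd hne
    have hnonempty : idxs ≠ [] := by
      intro h; rw [h] at hmem; exact List.not_mem_nil hmem
    rw [if_neg hnonempty]
    have hminval : PySem.List.min? idxs id = some (i : Int) := by
      cases hmq : PySem.List.min? idxs id with
      | none => exact absurd ((PySem.List.min?_eq_none_iff _ _).1 hmq) hnonempty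
      | some m =>
          have hm1 : m ∈ idxs := PySem.List.min?_mem hmq
          have hm2 := PySem.List.min?_isMin hmq (i : Int) hmem
          have hm3 := hge m hm1
          simp only [id] at hm2
          congr 1
          omega
    rw [hminval]
    show PySem.List.slice l none (some ((i : Int) + 1)) = scanB l
    rw [PySem.List.slice_to _ (by omega)]
    rw [scanB_of_first_hit l i (hitB_of l i c hc hsp hCmem) hmin]
    congr 1
  · -- no hit anywhere: every find is -1, the list is empty, both sides return l
    rw [not_exists] at hex
    have hall : ∀ c, (c = '.' ∨ c = '!' ∨ c = '?') → PySem.Chars.find l [c, ' '] = -1 := by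
      intro c hc
      rw [PySem.Chars.find_eq_neg_one_iff]
      intro hinf
      rw [← PySem.Chars.isIn_iff_infix, ← PySem.Chars.exists_prefix_drop_iff_isIn] at hinf
      obtain ⟨j, hj⟩ := hinf
      have hpair := (prefix_pair_iff c l j).1 hj
      exact absurd (hitB_of l j c hpair.1 hpair.2 hc) (by simp [hex j])
    unfold coreA
    have h1 : PySem.Chars.find l ['.', ' '] = -1 := hall '.' (Or.inl rfl)
    have h2 : PySem.Chars.find l ['!', ' '] = -1 := hall '!' (Or.inr (Or.inl rfl))
    have h3 : PySem.Chars.find l ['?', ' '] = -1 := hall '?' (Or.inr (Or.inr rfl))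
    simp only [sepsA, List.map_cons, List.map_nil, h1, h2, h3]
    rw [(scanB_of_no_hit l (fun i => by simpa using hex i))]
    simp

-- ===== VERDICT (by name: the statement is the Claim_ definition above) =====
theorem build_status_message_spec : Claim_equal_build_status_message := by
  intro message _
  unfold Spec_build_status_message build_status_message build_status_message_alt
  simp only []
  rw [coreA_eq_scanB]
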